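-- pv_equiv track=rewrite | github.com/Bukio-chan/sotsuken_flask | main.py | get_start_time
-- ===== SOURCE A (Python) =====
-- def get_start_time(hour, minute):
--     num_result = 0
--     num = 2
--     for i in range(8, 21):
--         if hour == i:
--             num_result = num
--             if minute >= 30:
--                 num_result += 1
--         num += 2
--     return num_result
-- ===== SOURCE B (Python) =====
-- def get_start_time(hour, minute):
--     if 8 <= hour <= 20:
--         return 2 * (hour - 7) + (1 if minute >= 30 else 0)
--     return 0
-- ===== Notes on version B (the rewrite author's own statement) =====
-- stated objective: simpler
-- what changed: Replaced the 13-iteration scan over hours 8..20 with a direct range check and the closed form 2*(hour-7)+(minute>=30).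
import Mathlib
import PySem

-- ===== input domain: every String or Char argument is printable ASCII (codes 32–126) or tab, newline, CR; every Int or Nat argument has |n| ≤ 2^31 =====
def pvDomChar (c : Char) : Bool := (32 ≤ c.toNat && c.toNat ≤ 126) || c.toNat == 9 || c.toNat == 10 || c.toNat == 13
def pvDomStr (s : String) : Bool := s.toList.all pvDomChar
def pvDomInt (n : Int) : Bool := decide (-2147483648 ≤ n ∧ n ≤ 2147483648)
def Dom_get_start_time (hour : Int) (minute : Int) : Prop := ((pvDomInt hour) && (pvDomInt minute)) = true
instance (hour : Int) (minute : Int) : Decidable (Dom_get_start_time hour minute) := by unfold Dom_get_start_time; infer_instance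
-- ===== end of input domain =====

-- B replaces A's fixed 13-iteration scan with a range check and the closed form 2*(hour-7)+(minute>=30): simpler, no loop.


-- ===== PORT A =====
-- loop over range(8, 21) accumulating (num_result, num)
def get_start_time (hour : Int) (minute : Int) : Int :=
  (((PySem.List.pyRange 8 21 1).foldl (fun (st : Int × Int) i =>
      let num_result := if hour == i then
          (if minute ≥ 30 then st.2 + 1 else st.2)
        else st.1
      (num_result, st.2 + 2)) ((0 : Int), (2 : Int)))).1

-- ===== PORT B =====
def get_start_time_alt (hour : Int) (minute : Int) : Int :=
  if 8 ≤ hour ∧ hour ≤ 20 then 2 * (hour - 7) + (if minute ≥ 30 then 1 else 0)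
  else 0

-- ===== PRECONDITION & SPEC =====
def Spec_get_start_time (hour : Int) (minute : Int) (out : Int) : Prop := out = get_start_time_alt hour minute
instance (hour : Int) (minute : Int) (out : Int) : Decidable (Spec_get_start_time hour minute out) := by unfold Spec_get_start_time; infer_instance

-- ===== CLAIM (what is proved, stated in full; the proofs are below) =====
def Claim_equal_get_start_time : Prop := ∀ (hour : Int) (minute : Int), Dom_get_start_time hour minute → Spec_get_start_time hour minute (get_start_time hour minute)

-- ===== LEMMAS AND PROOFS =====

-- ===== VERDICT (by name: the statement is the Claim_ definition above) =====
theorem get_start_time_spec : Claim_equal_get_start_time := by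
  intro hour minute _
  unfold Spec_get_start_time get_start_time get_start_time_alt
  have hr : PySem.List.pyRange 8 21 1 = [8,9,10,11,12,13,14,15,16,17,18,19,20] := by decide
  rw [hr]
  simp only [List.foldl, beq_iff_eq]
  by_cases h8 : hour = 8
  · subst h8; norm_num; split_ifs <;> omega
  by_cases h9 : hour = 9
  · subst h9; norm_num; split_ifs <;> omega
  by_cases h10 : hour = 10
  · subst h10; norm_num; split_ifs <;> omega
  by_cases h11 : hour = 11
  · subst h11; norm_num; split_ifs <;> omega
  by_cases h12 : hour = 12
  · subst h12; norm_num; split_ifs <;> omega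
  by_cases h13 : hour = 13
  · subst h13; norm_num; split_ifs <;> omega
  by_cases h14 : hour = 14
  · subst h14; norm_num; split_ifs <;> omega
  by_cases h15 : hour = 15
  · subst h15; norm_num; split_ifs <;> omega
  by_cases h16 : hour = 16
  · subst h16; norm_num; split_ifs <;> omega
  by_cases h17 : hour = 17
  · subst h17; norm_num; split_ifs <;> omega
  by_cases h18 : hour = 18
  · subst h18; norm_num; split_ifs <;> omega
  by_cases h19 : hour = 19
  · subst h19; norm_num; split_ifs <;> omega
  by_cases h20 : hour = 20
  · subst h20; norm_num; split_ifs <;> omega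
  simp only [if_neg h8, if_neg h9, if_neg h10, if_neg h11, if_neg h12, if_neg h13,
    if_neg h14, if_neg h15, if_neg h16, if_neg h17, if_neg h18, if_neg h19, if_neg h20]
  have : ¬ (8 ≤ hour ∧ hour ≤ 20) := by omega
  rw [if_neg this]
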